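-- pv_equiv track=rewrite | github.com/abolfazlshahsavaryyy/AD_Project | phase2.py | prepare_machine_grid
-- ===== SOURCE A (Python) =====
-- def prepare_machine_grid(machines, machine_cap_time, time_slots):
--     sorted_slots = sorted(time_slots)
--     slot_index = {t: i for i, t in enumerate(sorted_slots)}
--     n_slots = len(sorted_slots)
--     machine_grid = {}
--
--     for m in machines:
--         mid = m["id"]
--         default_cap = m.get("cpu_capacity", 1)
--         grid = [default_cap] * n_slots
--         for t, cap in machine_cap_time.get(mid, {}).items():
--             if int(t) in slot_index:
--                 grid[slot_index[int(t)]] = cap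
--         machine_grid[mid] = grid
--
--     return machine_grid, sorted_slots, n_slots
-- ===== SOURCE B (Python) =====
-- def _row(m, machine_cap_time, sorted_slots):
--     default_cap = m.get("cpu_capacity", 1)
--     ov = {int(t): cap for t, cap in machine_cap_time.get(m["id"], {}).items()}
--     return m["id"], [ov.get(slot, default_cap) for slot in sorted_slots]
--
-- def prepare_machine_grid(machines, machine_cap_time, time_slots):
--     sorted_slots = sorted(time_slots)
--     machine_grid = dict(_row(m, machine_cap_time, sorted_slots) for m in machines)
--     return machine_grid, sorted_slots, len(sorted_slots)
-- ===== Notes on version B (the rewrite author's own statement) =====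
-- stated objective: simpler
-- what changed: B drops A's global slot->index table and init-then-patch-by-index grid construction; it maps each machine to an (id, row) pair via a helper that builds an int-keyed override dict and reads the row off the sorted slots by value lookup, and assembles the result with dict() over those pairs.
import Mathlib
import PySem

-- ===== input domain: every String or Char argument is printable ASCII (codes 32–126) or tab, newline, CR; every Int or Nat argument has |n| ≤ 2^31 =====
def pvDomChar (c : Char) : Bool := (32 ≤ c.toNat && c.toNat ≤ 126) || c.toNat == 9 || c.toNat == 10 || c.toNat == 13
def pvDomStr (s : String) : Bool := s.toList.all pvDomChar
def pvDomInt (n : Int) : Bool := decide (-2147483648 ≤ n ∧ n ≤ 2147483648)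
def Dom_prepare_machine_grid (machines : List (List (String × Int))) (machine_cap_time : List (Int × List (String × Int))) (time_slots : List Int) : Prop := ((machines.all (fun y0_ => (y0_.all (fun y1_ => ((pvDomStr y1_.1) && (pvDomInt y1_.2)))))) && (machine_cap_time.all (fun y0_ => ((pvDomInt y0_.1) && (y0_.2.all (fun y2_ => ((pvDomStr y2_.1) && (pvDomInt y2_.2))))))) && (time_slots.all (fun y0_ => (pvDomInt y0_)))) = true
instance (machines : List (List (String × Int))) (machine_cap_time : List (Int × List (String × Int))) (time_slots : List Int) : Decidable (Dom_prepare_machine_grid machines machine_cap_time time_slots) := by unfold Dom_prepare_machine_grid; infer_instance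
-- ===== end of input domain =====

-- B drops A's slot→index table and init-then-patch-by-index construction: it maps each machine to an
-- (id, row) pair — the row read off the sorted slots by value lookup in an override dict — and
-- assembles the dict from those pairs at once (objective: simpler).

-- ===== PORT A =====
-- slot_index = {t: i for i, t in enumerate(sorted_slots)}
def pvSlotIndex (sorted_slots : List Int) : PySem.Dict Int Int :=
  (PySem.List.enumerate sorted_slots 0).foldl (fun d p => d.insert p.2 p.1) PySem.Dict.empty

-- A's inner patch loop: for t, cap in caps: if int(t) in slot_index: grid[slot_index[int(t)]] = cap
def pvGridA (slot_index : PySem.Dict Int Int) (caps : List (String × Int)) (grid : List Int) : List Int :=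
  caps.foldl (fun g p =>
    match PySem.Int.ofStr? p.1 with
    | none => g   -- int(t) raises ValueError: unreachable under Pre_
    | some k => if slot_index.contains k then PySem.List.pySetD g (slot_index.getD k 0) p.2 else g) grid

def prepare_machine_grid (machines : List (List (String × Int))) (machine_cap_time : List (Int × List (String × Int))) (time_slots : List Int) : (List (Int × List Int)) × List Int × Int :=
  let sorted_slots := PySem.List.sorted time_slots (fun x => x) false
  let slot_index := pvSlotIndex sorted_slots
  let n_slots : Int := sorted_slots.length
  let machine_grid : PySem.Dict Int (List Int) :=
    machines.foldl (fun mg m =>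
      match List.lookup "id" m with
      | none => mg   -- m["id"] raises KeyError: unreachable under Pre_
      | some mid =>
        let default_cap := (List.lookup "cpu_capacity" m).getD 1
        mg.insert mid (pvGridA slot_index ((List.lookup mid machine_cap_time).getD [])
          (PySem.List.pyRepeat [default_cap] n_slots))) PySem.Dict.empty
  (machine_grid.items, sorted_slots, n_slots)

-- ===== PORT B =====
-- ov = {int(t): cap for t, cap in caps.items()}
def pvOverrides (caps : List (String × Int)) : PySem.Dict Int Int :=
  caps.foldl (fun d p =>
    match PySem.Int.ofStr? p.1 with
    | none => d   -- int(t) raises ValueError: unreachable under Pre_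
    | some k => d.insert k p.2) PySem.Dict.empty

-- _row(m, machine_cap_time, sorted_slots): the (id, grid-row) pair for one machine
def pvRow (machine_cap_time : List (Int × List (String × Int))) (sorted_slots : List Int) (m : List (String × Int)) : Int × List Int :=
  let mid := (List.lookup "id" m).getD 0   -- m["id"] raises KeyError when absent: unreachable under Pre_
  let default_cap := (List.lookup "cpu_capacity" m).getD 1
  let ov := pvOverrides ((List.lookup mid machine_cap_time).getD [])
  (mid, sorted_slots.map (fun slot => ov.getD slot default_cap))

def prepare_machine_grid_alt (machines : List (List (String × Int))) (machine_cap_time : List (Int × List (String × Int))) (time_slots : List Int) : (List (Int × List Int)) × List Int × Int :=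
  let sorted_slots := PySem.List.sorted time_slots (fun x => x) false
  let machine_grid := PySem.Dict.ofList (machines.map (pvRow machine_cap_time sorted_slots))
  (machine_grid.items, sorted_slots, (sorted_slots.length : Int))

-- ===== PRECONDITION & SPEC =====
-- Pre_ excludes: machines without an "id" key (A raises KeyError); override keys that int() cannot
-- parse in the capacity dict of a machine id that occurs (A raises ValueError); and inputs where a
-- machine's parsed override key is a time-slot value occurring more than once in time_slots (which
-- occurrence of a duplicate slot receives the override is an accidental first-vs-last corner, on
-- which A and B defensibly differ).
def Pre_prepare_machine_grid (machines : List (List (String × Int))) (machine_cap_time : List (Int × List (String × Int))) (time_slots : List Int) : Prop :=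
  ∀ m ∈ machines, (List.lookup "id" m).isSome = true ∧
    ∀ p ∈ (List.lookup ((List.lookup "id" m).getD 0) machine_cap_time).getD [],
      (PySem.Int.ofStr? p.1).isSome = true ∧
      time_slots.count ((PySem.Int.ofStr? p.1).getD 0) ≤ 1
instance (machines : List (List (String × Int))) (machine_cap_time : List (Int × List (String × Int))) (time_slots : List Int) : Decidable (Pre_prepare_machine_grid machines machine_cap_time time_slots) := by unfold Pre_prepare_machine_grid; infer_instance

def pvWitness_prepare_machine_grid : (List (List (String × Int))) × (List (Int × List (String × Int))) × List Int :=
  ([[("id", 1), ("cpu_capacity", 2)], [("id", 2)]], [(1, [("3", 5), ("9", 7)])], [3, 4])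

def Spec_prepare_machine_grid (machines : List (List (String × Int))) (machine_cap_time : List (Int × List (String × Int))) (time_slots : List Int) (out : (List (Int × List Int)) × List Int × Int) : Prop := out = prepare_machine_grid_alt machines machine_cap_time time_slots
instance (machines : List (List (String × Int))) (machine_cap_time : List (Int × List (String × Int))) (time_slots : List Int) (out : (List (Int × List Int)) × List Int × Int) : Decidable (Spec_prepare_machine_grid machines machine_cap_time time_slots out) := by unfold Spec_prepare_machine_grid; infer_instance

-- ===== CLAIM (what is proved, stated in full; the proofs are below) =====
def Claim_equal_prepare_machine_grid : Prop := ∀ (machines : List (List (String × Int))) (machine_cap_time : List (Int × List (String × Int))) (time_slots : List Int), Dom_prepare_machine_grid machines machine_cap_time time_slots → Pre_prepare_machine_grid machines machine_cap_time time_slots → Spec_prepare_machine_grid machines machine_cap_time time_slots (prepare_machine_grid machines machine_cap_time time_slots)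

-- ===== LEMMAS AND PROOFS =====

-- the dict {t: i for i, t in enumerate(l, s)}, looked up at a value occurring at most once in l
theorem pvFoldEnum_get? (l : List Int) (s : Int) (d : PySem.Dict Int Int) (v : Int) (h : l.count v ≤ 1) :
    ((PySem.List.enumerate l s).foldl (fun d p => d.insert p.2 p.1) d).get? v
      = (match PySem.List.index? l v with
         | some j => some (s + (j : Int))
         | none => d.get? v) := by
  induction l generalizing s d with
  | nil => simp [PySem.List.enumerate, PySem.List.index?]
  | cons x t ih =>
    rw [PySem.List.enumerate_cons, List.foldl_cons]
    by_cases hx : x = v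
    · subst hx
      have ht : x ∉ t := by
        rw [List.count_cons_self] at h
        exact List.count_eq_zero.mp (by omega)
      rw [ih (s + 1) (d.insert x s) (by simp [List.count_eq_zero.mpr ht]),
        (PySem.List.index?_eq_none_iff t x).mpr ht, PySem.List.index?_cons_self]
      simp [PySem.Dict.get?_insert_self]
    · have hcount : t.count v ≤ 1 := by
        rw [List.count_cons_of_ne hx] at h
        exact h
      rw [ih (s + 1) (d.insert x s) hcount, PySem.List.index?_cons_of_ne t hx]
      cases ht : PySem.List.index? t v with
      | none => simp [PySem.Dict.get?_insert_of_ne d s (Ne.symm hx)]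
      | some j => simp; omega

theorem pvSlotIndex_get? (ss : List Int) (v : Int) (h : ss.count v ≤ 1) :
    (pvSlotIndex ss).get? v = (PySem.List.index? ss v).map (fun j => (j : Int)) := by
  unfold pvSlotIndex
  rw [pvFoldEnum_get? ss 0 PySem.Dict.empty v h]
  cases PySem.List.index? ss v with
  | none => simp [PySem.Dict.empty, PySem.Dict.get?]
  | some j => simp

theorem pvSlotIndex_contains (ss : List Int) (v : Int) (h : ss.count v ≤ 1) :
    (pvSlotIndex ss).contains v = decide (v ∈ ss) := by
  rw [PySem.Dict.contains_eq_isSome_get?, pvSlotIndex_get? ss v h]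
  cases hi : PySem.List.index? ss v with
  | none => simp [(PySem.List.index?_eq_none_iff ss v).mp hi]
  | some j =>
    have hm : v ∈ ss := (PySem.List.index?_isSome_iff ss v).mp (by rw [hi]; rfl)
    simp [hm]

theorem pvSlotIndex_getD (ss : List Int) (v : Int) (h : ss.count v ≤ 1) (j : Nat)
    (hj : PySem.List.index? ss v = some j) :
    (pvSlotIndex ss).getD v 0 = (j : Int) := by
  rw [PySem.Dict.getD_eq_get?_getD, pvSlotIndex_get? ss v h, hj]
  simp

-- a value occurring at most once in ss sits only at its index? position
theorem pvUniquePos (ss : List Int) (k : Int) (j : Nat)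
    (hj : PySem.List.index? ss k = some j) (hc : ss.count k ≤ 1)
    (i : Nat) (hi : i < ss.length) (h1 : ss[i] = k) : i = j := by
  obtain ⟨pre, suf, hsplit, hlen, hnotpre⟩ := (PySem.List.index?_eq_some_iff ss k j).mp hj
  subst hsplit
  have hsuf : k ∉ suf := by
    rw [List.count_append, List.count_cons_self] at hc
    exact List.count_eq_zero.mp (by omega)
  rcases Nat.lt_trichotomy i j with h | h | h
  · exfalso
    apply hnotpre
    have hip : i < pre.length := by omega
    have h2 : (pre ++ k :: suf)[i] = pre[i] := List.getElem_append_left hip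
    rw [h2] at h1
    exact h1 ▸ List.getElem_mem hip
  · exact h
  · exfalso
    apply hsuf
    have hip : pre.length ≤ i := by omega
    have h2 : (pre ++ k :: suf)[i] = (k :: suf)[i - pre.length]'(by
      simp at hi; simp; omega) := List.getElem_append_right hip
    rw [h2] at h1
    rw [List.getElem_cons, dif_neg (by omega)] at h1
    exact h1 ▸ List.getElem_mem _

-- writing through that unique index is a pointwise update of a map over ss
theorem pvSet_map (ss : List Int) (k : Int) (hc : ss.count k ≤ 1) (j : Nat)
    (hj : PySem.List.index? ss k = some j) (f : Int → Int) (c : Int) :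
    (ss.map f).set j c = ss.map (fun s => if s = k then c else f s) := by
  obtain ⟨hjl, hjk, _⟩ := PySem.List.getElem_of_index?_eq_some hj
  apply List.ext_getElem
  · simp
  · intro i h1 h2
    simp only [List.getElem_set, List.getElem_map] at *
    by_cases hik : i = j
    · subst hik; simp [hjk]
    · rw [if_neg (fun h => hik h.symm), if_neg]
      intro hccl
      exact hik (pvUniquePos ss k j hj hc i (by simpa using h2) hccl)

-- A's patch loop over caps, started on a grid of d-lookups, lands on a grid of lookups in d extended by caps
theorem pvGridA_eq (ss : List Int) (caps : List (String × Int))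
    (hcnt : ∀ p ∈ caps, ∀ k, PySem.Int.ofStr? p.1 = some k → ss.count k ≤ 1)
    (dc : Int) (d : PySem.Dict Int Int) :
    pvGridA (pvSlotIndex ss) caps (ss.map (fun s => d.getD s dc))
      = ss.map (fun s =>
          (caps.foldl (fun d' p =>
            match PySem.Int.ofStr? p.1 with
            | none => d'
            | some k => d'.insert k p.2) d).getD s dc) := by
  induction caps generalizing d with
  | nil => rfl
  | cons p rest ih =>
    have hcnt' : ∀ q ∈ rest, ∀ k, PySem.Int.ofStr? q.1 = some k → ss.count k ≤ 1 :=
      fun q hq => hcnt q (List.mem_cons_of_mem p hq)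
    unfold pvGridA
    rw [List.foldl_cons, List.foldl_cons]
    cases hk : PySem.Int.ofStr? p.1 with
    | none => exact ih hcnt' d
    | some k =>
      have hc : ss.count k ≤ 1 := hcnt p (List.mem_cons_self) k hk
      simp only []
      rw [pvSlotIndex_contains ss k hc]
      by_cases hm : k ∈ ss
      · obtain ⟨j, hj⟩ : ∃ j, PySem.List.index? ss k = some j :=
          Option.isSome_iff_exists.mp ((PySem.List.index?_isSome_iff ss k).mpr hm)
        rw [if_pos (by simpa using hm), pvSlotIndex_getD ss k hc j hj,
          PySem.List.pySetD_natCast, pvSet_map ss k hc j hj]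
        have hstep : (ss.map fun s => if s = k then p.2 else d.getD s dc)
            = ss.map (fun s => (d.insert k p.2).getD s dc) := by
          apply List.map_congr_left
          intro s _
          by_cases hsk : s = k
          · subst hsk; simp [PySem.Dict.getD_insert_self]
          · simp [hsk, PySem.Dict.getD_insert_of_ne _ _ _ hsk]
        rw [hstep]
        exact ih hcnt' (d.insert k p.2)
      · rw [if_neg (by simpa using hm)]
        have hstep : (ss.map fun s => d.getD s dc)
            = ss.map (fun s => (d.insert k p.2).getD s dc) := by
          apply List.map_congr_left
          intro s hs
          have hne : s ≠ k := fun h => hm (h ▸ hs)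
          rw [PySem.Dict.getD_insert_of_ne _ _ _ hne]
        rw [hstep]
        exact ih hcnt' (d.insert k p.2)

theorem pvGridA_eq_overrides (ss : List Int) (caps : List (String × Int))
    (hcnt : ∀ p ∈ caps, ∀ k, PySem.Int.ofStr? p.1 = some k → ss.count k ≤ 1) (dc : Int) :
    pvGridA (pvSlotIndex ss) caps (PySem.List.pyRepeat [dc] (ss.length : Int))
      = ss.map (fun s => (pvOverrides caps).getD s dc) := by
  have hbase : PySem.List.pyRepeat [dc] (ss.length : Int)
      = ss.map (fun s => PySem.Dict.empty.getD s dc) := by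
    rw [PySem.List.pyRepeat_singleton]
    simp [PySem.Dict.getD_empty, List.map_const']
  rw [hbase, pvGridA_eq ss caps hcnt dc PySem.Dict.empty]
  rfl

-- the fused per-machine insert loop is the pair-insert loop over the mapped rows
theorem pvFoldRows {a : Type} (f : a -> Int × List Int) (l : List a) (d : PySem.Dict Int (List Int)) :
    l.foldl (fun d m => d.insert (f m).1 (f m).2) d
      = (l.map f).foldl (fun d p => d.insert p.1 p.2) d := by
  induction l generalizing d with
  | nil => rfl
  | cons x t ih => simp [List.foldl_cons, ih]

-- ===== VERDICT (by name: the statement is the Claim_ definition above) =====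
theorem prepare_machine_grid_spec : Claim_equal_prepare_machine_grid := by
  intro machines machine_cap_time time_slots _hdom hpre
  unfold Spec_prepare_machine_grid
  have hfold :
      machines.foldl (fun (mg : PySem.Dict Int (List Int)) (m : List (String × Int)) =>
        match List.lookup "id" m with
        | none => mg
        | some mid =>
          mg.insert mid (pvGridA (pvSlotIndex (PySem.List.sorted time_slots (fun x => x) false))
            ((List.lookup mid machine_cap_time).getD [])
            (PySem.List.pyRepeat [((List.lookup "cpu_capacity" m).getD 1)]
              ((PySem.List.sorted time_slots (fun x => x) false).length : Int)))) PySem.Dict.empty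
    = PySem.Dict.ofList (machines.map (pvRow machine_cap_time (PySem.List.sorted time_slots (fun x => x) false))) := by
    have hstep : machines.foldl (fun (mg : PySem.Dict Int (List Int)) (m : List (String × Int)) =>
        match List.lookup "id" m with
        | none => mg
        | some mid =>
          mg.insert mid (pvGridA (pvSlotIndex (PySem.List.sorted time_slots (fun x => x) false))
            ((List.lookup mid machine_cap_time).getD [])
            (PySem.List.pyRepeat [((List.lookup "cpu_capacity" m).getD 1)]
              ((PySem.List.sorted time_slots (fun x => x) false).length : Int)))) PySem.Dict.empty
      = machines.foldl (fun (mg : PySem.Dict Int (List Int)) (m : List (String × Int)) =>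
          mg.insert (pvRow machine_cap_time (PySem.List.sorted time_slots (fun x => x) false) m).1
            (pvRow machine_cap_time (PySem.List.sorted time_slots (fun x => x) false) m).2) PySem.Dict.empty := by
      apply PySem.List.foldl_congr_mem
      intro mg m hm
      obtain ⟨hid, hcaps⟩ := hpre m hm
      cases hlk : List.lookup "id" m with
      | none => rw [hlk] at hid; exact absurd hid (by simp)
      | some mid =>
        simp only [pvRow, hlk, Option.getD_some]
        congr 1
        apply pvGridA_eq_overrides
        intro p hp k hk
        have hmid : ((List.lookup "id" m).getD 0) = mid := by rw [hlk]; rfl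
        have := (hcaps p (by rw [hmid]; exact hp)).2
        rw [hk] at this
        calc (PySem.List.sorted time_slots (fun x => x) false).count k
            = time_slots.count k :=
              (PySem.List.sorted_perm time_slots (fun x => x) false).count_eq k
          _ ≤ 1 := by simpa using this
    rw [hstep]
    rw [pvFoldRows]
    rfl
  show ((machines.foldl _ PySem.Dict.empty).items,
      PySem.List.sorted time_slots (fun x => x) false,
      ((PySem.List.sorted time_slots (fun x => x) false).length : Int))
    = ((PySem.Dict.ofList (machines.map (pvRow machine_cap_time (PySem.List.sorted time_slots (fun x => x) false)))).items,
      PySem.List.sorted time_slots (fun x => x) false,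
      ((PySem.List.sorted time_slots (fun x => x) false).length : Int))
  rw [hfold]
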